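-- pv_equiv track=rewrite | github.com/sueszli/vector-database-benchmark | dataset/python-mutated/maximum-number-of-people-that-can-be-caught-in-tag.py | catchMaximumAmountofPeople
-- ===== SOURCE A (Python) =====
-- def catchMaximumAmountofPeople(team, dist):
--     if False:
--         while True:
--             i = 10
--     '\n        :type team: List[int]\n        :type dist: int\n        :rtype: int\n        '
--     result = i = j = 0
--     while i < len(team) and j < len(team):
--         if i + dist < j or team[i] != 1:
--             i += 1
--         elif j + dist < i or team[j] != 0:
--             j += 1
--         else:
--             result += 1
--             i += 1
--             j += 1
--     return result
-- ===== SOURCE B (Python) =====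
-- def catchMaximumAmountofPeople(team, dist):
--     pending_ones = []
--     pending_zeros = []
--     result = 0
--     for p, v in enumerate(team):
--         if v == 1:
--             while pending_zeros and pending_zeros[0] < p - dist:
--                 pending_zeros.pop(0)
--             if pending_zeros:
--                 pending_zeros.pop(0)
--                 result += 1
--             else:
--                 pending_ones.append(p)
--         elif v == 0:
--             while pending_ones and pending_ones[0] < p - dist:
--                 pending_ones.pop(0)
--             if pending_ones:
--                 pending_ones.pop(0)
--                 result += 1
--             else:
--                 pending_zeros.append(p)
--     return result
-- ===== Notes on version B (the rewrite author's own statement) =====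
-- stated objective: alternative
-- what changed: B replaces A's dual-pointer walk over the raw array with a single for-loop over positions that maintains two pending queues (unmatched taggers / unmatched people): each arriving element first expires out-of-window entries of the opposite queue, then matches the earliest pending counterpart or enqueues itself.
import Mathlib
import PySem

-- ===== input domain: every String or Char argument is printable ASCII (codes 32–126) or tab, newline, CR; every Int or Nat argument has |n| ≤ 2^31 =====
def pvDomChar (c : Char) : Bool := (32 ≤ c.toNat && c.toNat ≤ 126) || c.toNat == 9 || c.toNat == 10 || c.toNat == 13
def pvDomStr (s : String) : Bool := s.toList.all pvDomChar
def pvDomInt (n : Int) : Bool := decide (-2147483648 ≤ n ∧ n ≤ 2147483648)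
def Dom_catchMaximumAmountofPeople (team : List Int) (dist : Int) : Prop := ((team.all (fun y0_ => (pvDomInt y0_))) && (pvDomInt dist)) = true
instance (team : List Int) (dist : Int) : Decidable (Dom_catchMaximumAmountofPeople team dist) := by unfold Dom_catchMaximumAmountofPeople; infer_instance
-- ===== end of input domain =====

-- B replaces A's dual-pointer walk with a single pass that keeps two pending queues
-- (unmatched taggers / unmatched people) with expiry (objective: alternative; same result).


-- ===== PORT A =====
-- A's while loop; i, j only ever grow from 0, so Nat counters are faithful; team.getD i 0 is
-- Python's team[i], in range by the loop guard.
def pvLoopA (team : List Int) (dist : Int) (i j : Nat) (result : Int) : Int :=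
  if i < team.length ∧ j < team.length then
    if (i : Int) + dist < (j : Int) ∨ team.getD i 0 ≠ 1 then
      pvLoopA team dist (i + 1) j result
    else if (j : Int) + dist < (i : Int) ∨ team.getD j 0 ≠ 0 then
      pvLoopA team dist i (j + 1) result
    else
      pvLoopA team dist (i + 1) (j + 1) (result + 1)
  else result
termination_by (team.length - i) + (team.length - j)
decreasing_by all_goals omega

def catchMaximumAmountofPeople (team : List Int) (dist : Int) : Int :=
  pvLoopA team dist 0 0 0

-- ===== PORT B =====
-- Source B's inner 'while queue and queue[0] < p - dist: queue.pop(0)' loop.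
def pvExpire (dist p : Int) : List Int → List Int
  | z :: zs => if z < p - dist then pvExpire dist p zs else z :: zs
  | [] => []

-- Source B's for-loop body: state = (pending_ones, pending_zeros, result).
def pvStepB (dist : Int) (st : List Int × List Int × Int) (pv : Int × Int) : List Int × List Int × Int :=
  if pv.2 = 1 then
    match pvExpire dist pv.1 st.2.1 with
    | _ :: zs => (st.1, zs, st.2.2 + 1)
    | [] => (st.1 ++ [pv.1], [], st.2.2)
  else if pv.2 = 0 then
    match pvExpire dist pv.1 st.1 with
    | _ :: os => (os, st.2.1, st.2.2 + 1)
    | [] => ([], st.2.1 ++ [pv.1], st.2.2)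
  else st

def catchMaximumAmountofPeople_alt (team : List Int) (dist : Int) : Int :=
  ((PySem.List.enumerate team 0).foldl (pvStepB dist) ([], [], 0)).2.2

-- ===== PRECONDITION & SPEC =====
def Spec_catchMaximumAmountofPeople (team : List Int) (dist : Int) (out : Int) : Prop := out = catchMaximumAmountofPeople_alt team dist
instance (team : List Int) (dist : Int) (out : Int) : Decidable (Spec_catchMaximumAmountofPeople team dist out) := by unfold Spec_catchMaximumAmountofPeople; infer_instance

-- ===== CLAIM (what is proved, stated in full; the proofs are below) =====
def Claim_equal_catchMaximumAmountofPeople : Prop := ∀ (team : List Int) (dist : Int), Dom_catchMaximumAmountofPeople team dist → Spec_catchMaximumAmountofPeople team dist (catchMaximumAmountofPeople team dist)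

-- ===== LEMMAS AND PROOFS =====

-- common reference point for both sides: a two-pointer greedy over the two index lists
def pvTwoPtr (dist : Int) : List Int → List Int → Int → Int
  | a :: as, b :: bs, result =>
    if |a - b| ≤ dist then pvTwoPtr dist as bs (result + 1)
    else if a < b then pvTwoPtr dist as (b :: bs) result
    else pvTwoPtr dist (a :: as) bs result
  | _, _, result => result

-- indices of value v in xs, counted from offset s
def pvIdxFrom (v : Int) : List Int → Int → List Int
  | [], _ => []
  | a :: as, s => if a = v then s :: pvIdxFrom v as (s + 1) else pvIdxFrom v as (s + 1)

theorem pvIdxFrom_ge (v : Int) (xs : List Int) (s : Int) :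
    ∀ x ∈ pvIdxFrom v xs s, s ≤ x := by
  induction xs generalizing s with
  | nil => simp [pvIdxFrom]
  | cons a as ih =>
    intro x hx
    by_cases hv : a = v
    · simp only [pvIdxFrom, if_pos hv, List.mem_cons] at hx
      rcases hx with rfl | hx
      · omega
      · have := ih (s + 1) x hx; omega
    · simp only [pvIdxFrom, if_neg hv] at hx
      have := ih (s + 1) x hx; omega

theorem pvIdxFrom_drop_succ (v : Int) (team : List Int) (i : Nat) (h : i < team.length) :
    pvIdxFrom v (team.drop i) i =
      if team[i] = v then (i : Int) :: pvIdxFrom v (team.drop (i + 1)) ((i : Int) + 1)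
      else pvIdxFrom v (team.drop (i + 1)) ((i : Int) + 1) := by
  rw [List.drop_eq_getElem_cons h]
  simp [pvIdxFrom]

-- with a negative dist A can never reach its match branch: both guards would force |i-j| ≤ dist
theorem pvLoopA_neg (team : List Int) (dist : Int) (hd : dist < 0) :
    ∀ i j : Nat, ∀ r : Int, pvLoopA team dist i j r = r := by
  intro i j r
  fun_induction pvLoopA team dist i j r with
  | case1 i j r h hb ih => exact ih
  | case2 i j r h hb1 hb2 ih => exact ih
  | case3 i j r h hb1 hb2 ih =>
    push Not at hb1 hb2
    omega
  | case4 i j r h => rfl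

theorem pvTwoPtr_neg (dist : Int) (hd : dist < 0) :
    ∀ as bs : List Int, ∀ r : Int, pvTwoPtr dist as bs r = r := by
  intro as bs r
  fun_induction pvTwoPtr dist as bs r with
  | case1 a as b bs r hab ih =>
    exact absurd hab (by have := abs_nonneg (a - b); omega)
  | case2 a as b bs r hab hlt ih => exact ih
  | case3 a as b bs r hab hlt ih => exact ih
  | case4 as bs r h => rfl

theorem pvLoopA_eq_twoPtr (team : List Int) (dist : Int) (hd : 0 ≤ dist) :
    ∀ i j : Nat, ∀ r : Int,
      pvLoopA team dist i j r =
        pvTwoPtr dist (pvIdxFrom 1 (team.drop i) i) (pvIdxFrom 0 (team.drop j) j) r := by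
  intro i j r
  fun_induction pvLoopA team dist i j r with
  | case1 i j r h hb ih =>
    rw [ih]; push_cast
    have hi : i < team.length := h.1
    by_cases h1 : team.getD i 0 = 1
    · rw [List.getD_eq_getElem _ _ hi] at h1
      have hij : (i : Int) + dist < (j : Int) := by
        rcases hb with h' | h'
        · exact h'
        · exact absurd (by rw [List.getD_eq_getElem _ _ hi]; exact h1) h'
      rw [pvIdxFrom_drop_succ 1 team i hi, if_pos h1]
      cases hz : pvIdxFrom 0 (team.drop j) (j : Int) with
      | nil => simp [pvTwoPtr]
      | cons z zs =>
        have hzj : (j : Int) ≤ z := pvIdxFrom_ge 0 _ _ z (by rw [hz]; exact List.mem_cons_self ..)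
        have hne : ¬ |(i : Int) - z| ≤ dist := by
          intro hc; rw [abs_le] at hc; omega
        have hlt : (i : Int) < z := by omega
        simp [pvTwoPtr, hne, hlt]
    · rw [List.getD_eq_getElem _ _ hi] at h1
      rw [pvIdxFrom_drop_succ 1 team i hi, if_neg h1]
  | case2 i j r h hb1 hb2 ih =>
    rw [ih]; push_cast
    have hi : i < team.length := h.1
    have hj : j < team.length := h.2
    push Not at hb1
    obtain ⟨hij, h1⟩ := hb1
    rw [List.getD_eq_getElem _ _ hi] at h1
    by_cases h0 : team.getD j 0 = 0
    · rw [List.getD_eq_getElem _ _ hj] at h0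
      have hji : (j : Int) + dist < (i : Int) := by
        rcases hb2 with h' | h'
        · exact h'
        · exact absurd (by rw [List.getD_eq_getElem _ _ hj]; exact h0) h'
      rw [pvIdxFrom_drop_succ 0 team j hj, if_pos h0,
          pvIdxFrom_drop_succ 1 team i hi, if_pos h1]
      have hne : ¬ |(i : Int) - (j : Int)| ≤ dist := by
          intro hc; rw [abs_le] at hc; omega
      have hlt : ¬ (i : Int) < (j : Int) := by omega
      simp [pvTwoPtr, hne, hlt]
    · rw [List.getD_eq_getElem _ _ hj] at h0
      rw [pvIdxFrom_drop_succ 0 team j hj, if_neg h0]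
  | case3 i j r h hb1 hb2 ih =>
    rw [ih]; push_cast
    have hi : i < team.length := h.1
    have hj : j < team.length := h.2
    push Not at hb1
    push Not at hb2
    obtain ⟨hij, h1⟩ := hb1
    obtain ⟨hji, h0⟩ := hb2
    rw [List.getD_eq_getElem _ _ hi] at h1
    rw [List.getD_eq_getElem _ _ hj] at h0
    rw [pvIdxFrom_drop_succ 1 team i hi, if_pos h1,
        pvIdxFrom_drop_succ 0 team j hj, if_pos h0]
    have hab : |(i : Int) - (j : Int)| ≤ dist := by rw [abs_le]; omega
    simp [pvTwoPtr, hab]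
  | case4 i j r h =>
    rcases not_and_or.mp h with hi | hj
    · have : team.drop i = [] := List.drop_eq_nil_of_le (by omega)
      rw [this]
      cases pvIdxFrom 0 (team.drop j) (j : Int) <;> simp [pvIdxFrom, pvTwoPtr]
    · have : team.drop j = [] := List.drop_eq_nil_of_le (by omega)
      rw [this]
      cases pvIdxFrom 1 (team.drop i) (i : Int) <;> simp [pvIdxFrom, pvTwoPtr]

-- B-side: a '1' arriving at position p against the pending-zeros queue behaves exactly like
-- pvTwoPtr scanning the same queue (all entries < p): expired entries are skipped, the first
-- in-window entry matches.
theorem pvTwoPtr_one_step (dist p : Int) :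
    ∀ (pz Z X : List Int) (r : Int), (∀ z ∈ pz, z < p) →
      pvTwoPtr dist (p :: X) (pz ++ Z) r =
        match pvExpire dist p pz with
        | _ :: zs => pvTwoPtr dist X (zs ++ Z) (r + 1)
        | [] => pvTwoPtr dist (p :: X) Z r := by
  intro pz
  induction pz with
  | nil => intro Z X r _; simp [pvExpire]
  | cons z zs ih =>
    intro Z X r hlt
    have hz : z < p := hlt z (List.mem_cons_self ..)
    by_cases he : z < p - dist
    · have hne : ¬ |p - z| ≤ dist := by intro hc; rw [abs_le] at hc; omega
      have hpz : ¬ p < z := by omega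
      simp only [List.cons_append, pvTwoPtr, if_neg hne, if_neg hpz, pvExpire, if_pos he]
      exact ih Z X r (fun x hx => hlt x (List.mem_cons_of_mem _ hx))
    · have hab : |p - z| ≤ dist := by rw [abs_le]; omega
      simp [pvTwoPtr, hab, pvExpire, he]

-- symmetric: a '0' arriving at position p against the pending-ones queue
theorem pvTwoPtr_zero_step (dist p : Int) :
    ∀ (po X Z : List Int) (r : Int), (∀ o ∈ po, o < p) →
      pvTwoPtr dist (po ++ X) (p :: Z) r =
        match pvExpire dist p po with
        | _ :: os => pvTwoPtr dist (os ++ X) Z (r + 1)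
        | [] => pvTwoPtr dist X (p :: Z) r := by
  intro po
  induction po with
  | nil => intro X Z r _; simp [pvExpire]
  | cons o os ih =>
    intro X Z r hlt
    have ho : o < p := hlt o (List.mem_cons_self ..)
    by_cases he : o < p - dist
    · have hne : ¬ |o - p| ≤ dist := by intro hc; rw [abs_le] at hc; omega
      have hop : o < p := ho
      simp only [List.cons_append, pvTwoPtr, if_neg hne, if_pos hop, pvExpire, if_pos he]
      exact ih X Z r (fun x hx => hlt x (List.mem_cons_of_mem _ hx))
    · have hab : |o - p| ≤ dist := by rw [abs_le]; omega
      simp [pvTwoPtr, hab, pvExpire, he]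

theorem pvExpire_sublist (dist p : Int) :
    ∀ zs : List Int, (pvExpire dist p zs).Sublist zs := by
  intro zs
  induction zs with
  | nil => simp [pvExpire]
  | cons z zs ih =>
    by_cases he : z < p - dist
    · simp only [pvExpire, if_pos he]
      exact ih.cons z
    · simp [pvExpire, he]

-- main invariant: folding Source B's step over the enumeration starting at s, from a reachable
-- state (queue entries < s, at most one queue nonempty), computes the two-pointer greedy over
-- the queues extended by the index lists of the remaining suffix.
theorem pvFoldB_eq_twoPtr (dist : Int) :
    ∀ (team : List Int) (s : Int) (po pz : List Int) (r : Int),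
      (∀ x ∈ po, x < s) → (∀ x ∈ pz, x < s) → (po = [] ∨ pz = []) →
      ((PySem.List.enumerate team s).foldl (pvStepB dist) (po, pz, r)).2.2 =
        pvTwoPtr dist (po ++ pvIdxFrom 1 team s) (pz ++ pvIdxFrom 0 team s) r := by
  intro team
  induction team with
  | nil =>
    intro s po pz r hpo hpz hemp
    rcases hemp with rfl | rfl
    · simp only [PySem.List.enumerate_nil, List.foldl_nil, pvIdxFrom, List.append_nil]
      cases pz <;> simp [pvTwoPtr]
    · simp only [PySem.List.enumerate_nil, List.foldl_nil, pvIdxFrom, List.append_nil]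
      cases po <;> simp [pvTwoPtr]
  | cons a team ih =>
    intro s po pz r hpo hpz hemp
    rw [PySem.List.enumerate_cons, List.foldl_cons]
    by_cases h1 : a = 1
    · -- a tagger arrives at position s
      simp only [pvStepB, h1, pvIdxFrom, reduceIte, if_neg (one_ne_zero' ℤ)]
      rcases hemp with rfl | rfl
      · -- pending_ones empty: pvTwoPtr head is s itself
        simp only [List.nil_append]
        rw [pvTwoPtr_one_step dist s pz (pvIdxFrom 0 team (s + 1)) (pvIdxFrom 1 team (s + 1)) r hpz]
        cases hz : pvExpire dist s pz with
        | nil =>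
          dsimp only
          rw [ih (s + 1) [s] [] r
            (by intro x hx; simp at hx; omega) (by simp) (Or.inr rfl)]
          simp
        | cons z zs =>
          dsimp only
          rw [ih (s + 1) [] zs (r + 1) (by simp)
            (fun x hx => by
              have : x ∈ pz := (pvExpire_sublist dist s pz).mem (by rw [hz]; exact List.mem_cons_of_mem _ hx)
              have := hpz x this; omega)
            (Or.inl rfl)]
          simp
      · -- pending_zeros empty: just enqueue s
        simp only [pvExpire]
        rw [ih (s + 1) (po ++ [s]) [] r
          (by intro x hx; rcases List.mem_append.mp hx with h | h
              · have := hpo x h; omega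
              · simp at h; omega)
          (by simp) (Or.inr rfl)]
        simp [List.append_assoc]
    · by_cases h0 : a = 0
      · -- a catchable person arrives at position s
        simp only [pvStepB, h0, pvIdxFrom, reduceIte, if_neg (zero_ne_one' ℤ)]
        rcases hemp with rfl | rfl
        · -- pending_ones empty: just enqueue s
          simp only [pvExpire]
          rw [ih (s + 1) [] (pz ++ [s]) r (by simp)
            (by intro x hx; rcases List.mem_append.mp hx with h | h
                · have := hpz x h; omega
                · simp at h; omega)
            (Or.inl rfl)]
          simp [List.append_assoc]
        · simp only [List.nil_append]
          rw [pvTwoPtr_zero_step dist s po (pvIdxFrom 1 team (s + 1)) (pvIdxFrom 0 team (s + 1)) r hpo]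
          cases ho : pvExpire dist s po with
          | nil =>
            dsimp only
            rw [ih (s + 1) [] [s] r (by simp)
              (by intro x hx; simp at hx; omega) (Or.inl rfl)]
            simp
          | cons o os =>
            dsimp only
            rw [ih (s + 1) os [] (r + 1)
              (fun x hx => by
                have : x ∈ po := (pvExpire_sublist dist s po).mem (by rw [ho]; exact List.mem_cons_of_mem _ hx)
                have := hpo x this; omega)
              (by simp) (Or.inr rfl)]
            simp
      · -- a value that is neither 0 nor 1: skipped by both
        simp only [pvStepB, pvIdxFrom, if_neg h1, if_neg h0]
        exact ih (s + 1) po pz r (fun x hx => by have := hpo x hx; omega)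
          (fun x hx => by have := hpz x hx; omega) hemp

-- ===== VERDICT (by name: the statement is the Claim_ definition above) =====
theorem catchMaximumAmountofPeople_spec : Claim_equal_catchMaximumAmountofPeople := by
  intro team dist _
  unfold Spec_catchMaximumAmountofPeople catchMaximumAmountofPeople catchMaximumAmountofPeople_alt
  rw [pvFoldB_eq_twoPtr dist team 0 [] [] 0 (by simp) (by simp) (Or.inl rfl)]
  simp only [List.nil_append]
  rcases lt_or_ge dist 0 with hd | hd
  · rw [pvLoopA_neg team dist hd, pvTwoPtr_neg dist hd]
  · simpa using pvLoopA_eq_twoPtr team dist hd 0 0 0
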